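-- pv_equiv track=rewrite | github.com/5l1v3r1/AdvancedWebFuzzer | Encode/Encode.py | EnkodeHexOne
-- ===== SOURCE A (Python) =====
-- import binascii
--
-- def __HexEncode(text):
--     text = bytes(text, 'utf-8')
--     hexcode = binascii.hexlify(text)
--     return str(hexcode)
--
-- def EnkodeHexOne(text):  # with parametr %
--     text = __HexEncode(text)
--     text = text[2:-1]
--     out = '%'
--     i = -1
--     for t in text:
--         if i % 2 == 0:
--             out = out + t + "%"
--             i += 1
--         else:
--             out = out + t
--             i += 1
--     return out[0:len(out) - 1]
-- ===== SOURCE B (Python) =====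
-- def EnkodeHexOne(text):  # with parametr %
--     data = bytes(text, 'utf-8')
--     return ''.join('%%%02x' % b for b in data)
-- ===== Notes on version B (the rewrite author's own statement) =====
-- stated objective: faster
-- what changed: B formats each byte directly as a percent-prefixed two-digit lowercase hex string and joins them once, instead of hexlifying, slicing off the repr wrapper and walking the hex string char-by-char with a parity counter while growing the output by repeated string concatenation.
import Mathlib
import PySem

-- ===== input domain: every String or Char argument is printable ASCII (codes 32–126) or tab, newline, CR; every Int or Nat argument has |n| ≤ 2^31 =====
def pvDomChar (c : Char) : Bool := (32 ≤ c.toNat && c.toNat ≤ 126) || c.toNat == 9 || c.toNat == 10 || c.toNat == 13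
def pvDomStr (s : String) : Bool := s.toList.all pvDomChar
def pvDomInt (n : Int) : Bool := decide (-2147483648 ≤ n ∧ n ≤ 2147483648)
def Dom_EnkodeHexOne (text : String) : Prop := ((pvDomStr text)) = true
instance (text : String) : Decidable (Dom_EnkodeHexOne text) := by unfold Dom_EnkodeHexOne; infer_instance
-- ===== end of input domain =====

-- B replaces A's hexlify + repr-slice + parity-counter walk by formatting each byte
-- directly as "%xx" and joining (idiomatic; same O(n) cost). Ports are exact on the
-- ASCII input domain, where the UTF-8 bytes of the string are its code points.


-- ===== PORT A =====
-- one lowercase hex digit (shared by both ports' byte formatting)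
def pvHexDigit (n : Nat) : Char := "0123456789abcdef".toList.getD n '0'

-- the two lowercase hex digits of one byte
def pvHx (c : Char) : List Char := [pvHexDigit (c.toNat / 16), pvHexDigit (c.toNat % 16)]

-- __HexEncode: str(binascii.hexlify(bytes(text,'utf-8'))) = "b'" + hex + "'";
-- exact on the ASCII domain, where each byte is the char's code point
def pvHexEncode (text : String) : String :=
  String.ofList ('b' :: '\'' :: (text.toList.flatMap pvHx ++ ['\'']))

-- the body of A's for-loop: state (out, i)
def pvLoopA (st : String × Int) (t : Char) : String × Int :=
  if PySem.Int.mod st.2 2 = 0 then (st.1 ++ String.singleton t ++ "%", st.2 + 1)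
  else (st.1 ++ String.singleton t, st.2 + 1)

def EnkodeHexOne (text : String) : String :=
  let text1 := pvHexEncode text
  let text2 := PySem.Str.slice text1 (some 2) (some (-1))
  let st := text2.toList.foldl pvLoopA ("%", -1)
  PySem.Str.slice st.1 (some 0) (some ((PySem.Str.len st.1 : Int) - 1))

-- ===== PORT B =====
-- '%%%02x' % b : exact for b < 256 (every byte)
def pvPctHex (b : Nat) : String := String.ofList ['%', pvHexDigit (b / 16), pvHexDigit (b % 16)]

-- ''.join('%%%02x' % b for b in bytes(text,'utf-8')); bytes = code points on the ASCII domain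
def EnkodeHexOne_alt (text : String) : String :=
  PySem.Str.join "" (text.toList.map (fun c => pvPctHex c.toNat))

-- ===== PRECONDITION & SPEC =====
def Spec_EnkodeHexOne (text : String) (out : String) : Prop := out = EnkodeHexOne_alt text
instance (text : String) (out : String) : Decidable (Spec_EnkodeHexOne text out) := by unfold Spec_EnkodeHexOne; infer_instance

-- ===== CLAIM (what is proved, stated in full; the proofs are below) =====
def Claim_equal_EnkodeHexOne : Prop := ∀ (text : String), Dom_EnkodeHexOne text → Spec_EnkodeHexOne text (EnkodeHexOne text)

-- ===== LEMMAS AND PROOFS =====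

-- join with the empty separator is flatten
theorem pvJoin_nil_eq_flatten (xss : List (List Char)) : PySem.Chars.join [] xss = xss.flatten := by
  induction xss with
  | nil => exact PySem.Chars.join_nil []
  | cons h t ih =>
    cases t with
    | nil => simp [PySem.Chars.join_singleton]
    | cons b t2 => simp [PySem.Chars.join_cons_cons, ih]

-- A's slice [2:-1] peels the "b'" and "'" wrappers
theorem pvSlice_two_neg_one (l : List Char) :
    PySem.List.slice ('b' :: '\'' :: (l ++ ['\''])) (some 2) (some (-1)) = l := by
  simp [PySem.List.slice, PySem.List.clampIdx]
  rw [if_neg (by omega), show ((l.length : Int) + 1 + 1).toNat - 2 = l.length from by omega]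
  exact List.take_left

-- the parity-counter loop over the flat hex chars appends "xy%" per byte
theorem pvLoopA_flat (cs : List Char) (out : String) (k : Nat) :
    ((cs.flatMap pvHx).foldl pvLoopA (out, -1 + 2 * (k : Int))).1.toList
      = out.toList ++ cs.flatMap (fun c => pvHx c ++ ['%']) := by
  induction cs generalizing out k with
  | nil => simp
  | cons c rest ih =>
    have hk1 : -1 + 2 * (k : Int) + 1 + 1 = -1 + 2 * ((k + 1 : Nat) : Int) := by push_cast; ring
    simp only [List.flatMap_cons, List.foldl_append, pvHx, List.foldl_cons, List.foldl_nil]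
    rw [show pvLoopA (out, -1 + 2 * (k : Int)) (pvHexDigit (c.toNat / 16))
          = (out ++ String.singleton (pvHexDigit (c.toNat / 16)), -1 + 2 * (k : Int) + 1) from by
        simp [pvLoopA]]
    rw [show pvLoopA (out ++ String.singleton (pvHexDigit (c.toNat / 16)), -1 + 2 * (k : Int) + 1)
            (pvHexDigit (c.toNat % 16))
          = (out ++ String.singleton (pvHexDigit (c.toNat / 16)) ++ String.singleton (pvHexDigit (c.toNat % 16)) ++ "%",
             -1 + 2 * (k : Int) + 1 + 1) from by
        simp [pvLoopA]]
    rw [hk1, ih]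
    simp [pvHx]

-- the '%'-prefixed form and the '%'-suffixed form differ by rotating one '%'
theorem pvRotate (cs : List Char) :
    '%' :: cs.flatMap (fun c => pvHx c ++ ['%']) = cs.flatMap (fun c => '%' :: pvHx c) ++ ['%'] := by
  induction cs with
  | nil => rfl
  | cons c rest ih => simp [pvHx] at ih ⊢; simpa using ih

-- ===== VERDICT (by name: the statement is the Claim_ definition above) =====
theorem EnkodeHexOne_spec : Claim_equal_EnkodeHexOne := by
  intro text _
  unfold Spec_EnkodeHexOne EnkodeHexOne EnkodeHexOne_alt pvHexEncode
  apply String.toList_inj.mp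
  have hslice :
      (PySem.Str.slice (String.ofList ('b' :: '\'' :: (text.toList.flatMap pvHx ++ ['\'']))) (some 2) (some (-1))).toList
        = text.toList.flatMap pvHx := by
    rw [PySem.Str.toList_slice]
    simp only [PySem.Chars.slice_eq_listSlice, String.toList_ofList]
    exact pvSlice_two_neg_one _
  simp only [hslice]
  have hloop := pvLoopA_flat text.toList "%" 0
  simp only [Nat.cast_zero, mul_zero, add_zero] at hloop
  rw [PySem.Str.toList_slice]
  simp only [PySem.Chars.slice_eq_listSlice, PySem.List.slice_zero_start]
  have hpos : 1 ≤ (((text.toList.flatMap pvHx).foldl pvLoopA ("%", -1)).1).toList.length := by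
    rw [hloop]; simp
  have hlen : ((PySem.Str.len ((text.toList.flatMap pvHx).foldl pvLoopA ("%", -1)).1 : Int) - 1)
      = (((((text.toList.flatMap pvHx).foldl pvLoopA ("%", -1)).1).toList.length - 1 : Nat) : Int) := by
    rw [PySem.Str.len_eq]; omega
  rw [hlen, PySem.List.slice_to_natCast, ← List.dropLast_eq_take, hloop]
  show ('%' :: text.toList.flatMap (fun c => pvHx c ++ ['%'])).dropLast = _
  have hnil : ("" : String).toList = [] := rfl
  rw [pvRotate, List.dropLast_concat, PySem.Str.toList_join, hnil, pvJoin_nil_eq_flatten]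
  simp [pvPctHex, List.flatMap, pvHx, Function.comp_def]
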